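-- pv_equiv track=rewrite | github.com/langchain-ai/langchain | docs/scripts/arxiv_references.py | _get_doc_path
-- ===== SOURCE A (Python) =====
-- def _get_doc_path(file_parts: tuple[str, ...], file_extension) -> str:
--     """Get the relative path to the documentation page
--     from the absolute path of the file.
--     Remove file_extension
--     """
--     res = []
--     for el in file_parts[::-1]:
--         res.append(el)
--         if el == "docs":
--             break
--     ret = "/".join(reversed(res))
--     return ret[: -len(file_extension)] if ret.endswith(file_extension) else ret
-- ===== SOURCE B (Python) =====
-- def _get_doc_path(file_parts: tuple[str, ...], file_extension) -> str:
--     """Find the rightmost "docs" component and join the tail, instead of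
--     accumulating a reversed prefix with a break."""
--     if "docs" in file_parts:
--         idx = len(file_parts) - 1 - file_parts[::-1].index("docs")
--         ret = "/".join(file_parts[idx:])
--     else:
--         ret = "/".join(file_parts)
--     return ret[: -len(file_extension)] if ret.endswith(file_extension) else ret
-- ===== Notes on version B (the rewrite author's own statement) =====
-- stated objective: simpler
-- what changed: B locates the rightmost 'docs' component once and joins the slice from there, instead of A's reversed accumulation loop with break plus a second reversal.
import Mathlib
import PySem

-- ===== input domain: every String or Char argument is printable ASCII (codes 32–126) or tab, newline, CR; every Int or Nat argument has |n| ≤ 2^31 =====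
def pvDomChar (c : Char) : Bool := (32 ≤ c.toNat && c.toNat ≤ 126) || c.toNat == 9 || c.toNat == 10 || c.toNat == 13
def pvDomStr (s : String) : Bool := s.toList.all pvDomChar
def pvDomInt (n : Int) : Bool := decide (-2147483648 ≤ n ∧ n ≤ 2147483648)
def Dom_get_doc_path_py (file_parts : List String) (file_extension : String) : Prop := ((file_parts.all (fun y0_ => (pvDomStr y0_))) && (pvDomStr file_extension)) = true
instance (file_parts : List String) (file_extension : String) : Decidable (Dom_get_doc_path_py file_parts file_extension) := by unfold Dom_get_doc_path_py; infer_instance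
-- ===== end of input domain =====

-- B locates the rightmost "docs" component and joins the slice from there,
-- instead of A's reversed accumulation loop with break; return values only (no mutation).

-- ===== PORT A =====
-- the 'for el in file_parts[::-1]: res.append(el); if el == "docs": break' loop
def pvLoopA : List String → List String → List String
  | [], res => res
  | el :: rest, res =>
    let res' := res ++ [el]
    if el == "docs" then res' else pvLoopA rest res'

def get_doc_path_py (file_parts : List String) (file_extension : String) : String :=
  let res := pvLoopA file_parts.reverse []
  let ret := PySem.Str.join "/" res.reverse
  if PySem.Str.endswith ret file_extension then
    PySem.Str.slice ret none (some (-(PySem.Str.len file_extension : Int)))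
  else ret

-- ===== PORT B =====
def get_doc_path_py_alt (file_parts : List String) (file_extension : String) : String :=
  let ret :=
    if file_parts.contains "docs" then
      let idx : Int :=
        (file_parts.length : Int) - 1 -
          (((PySem.List.index? file_parts.reverse "docs").getD 0 : Nat) : Int)
      PySem.Str.join "/" (PySem.List.slice file_parts (some idx) none)
    else
      PySem.Str.join "/" file_parts
  if PySem.Str.endswith ret file_extension then
    PySem.Str.slice ret none (some (-(PySem.Str.len file_extension : Int)))
  else ret

-- ===== PRECONDITION & SPEC =====
def Spec_get_doc_path_py (file_parts : List String) (file_extension : String) (out : String) : Prop := out = get_doc_path_py_alt file_parts file_extension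
instance (file_parts : List String) (file_extension : String) (out : String) : Decidable (Spec_get_doc_path_py file_parts file_extension out) := by unfold Spec_get_doc_path_py; infer_instance

-- ===== CLAIM (what is proved, stated in full; the proofs are below) =====
def Claim_equal_get_doc_path_py : Prop := ∀ (file_parts : List String) (file_extension : String), Dom_get_doc_path_py file_parts file_extension → Spec_get_doc_path_py file_parts file_extension (get_doc_path_py file_parts file_extension)

-- ===== LEMMAS AND PROOFS =====

theorem pvLoopA_acc (r acc : List String) : pvLoopA r acc = acc ++ pvLoopA r [] := by
  induction r generalizing acc with
  | nil => simp [pvLoopA]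
  | cons el rest ih =>
    simp only [pvLoopA]
    by_cases h : (el == "docs") = true
    · simp [h]
    · rw [if_neg h, if_neg h, ih (acc ++ [el]), ih ([] ++ [el])]
      simp

-- pvLoopA r [] takes elements up to and including the first "docs"
theorem pvLoopA_no_docs (r : List String) (h : "docs" ∉ r) : pvLoopA r [] = r := by
  induction r with
  | nil => rfl
  | cons el rest ih =>
    simp only [pvLoopA]
    have hne : ¬ (el == "docs") = true := by
      simp only [beq_iff_eq]; intro he; exact h (by simp [he])
    rw [if_neg hne, pvLoopA_acc, ih (fun hm => h (List.mem_cons_of_mem _ hm))]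
    simp

theorem pvLoopA_take (r : List String) (k : Nat)
    (h : PySem.List.index? r "docs" = some k) : pvLoopA r [] = r.take (k + 1) := by
  induction r generalizing k with
  | nil => simp [PySem.List.index?] at h
  | cons el rest ih =>
    by_cases he : el = "docs"
    · subst he
      rw [PySem.List.index?_cons_self] at h
      cases h
      simp [pvLoopA]
    · rw [PySem.List.index?_cons_of_ne rest he] at h
      cases hk : PySem.List.index? rest "docs" with
      | none => rw [hk] at h; simp at h
      | some k' =>
        rw [hk] at h
        simp only [Option.map_some] at h
        cases h
        simp only [pvLoopA]
        rw [if_neg (by simpa using he), pvLoopA_acc, ih k' hk]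
        simp [List.take_succ_cons]

-- the two 'ret' computations agree
theorem ret_eq (xs : List String) :
    PySem.Str.join "/" (pvLoopA xs.reverse []).reverse =
      (if xs.contains "docs" then
        PySem.Str.join "/" (PySem.List.slice xs
          (some ((xs.length : Int) - 1 -
            (((PySem.List.index? xs.reverse "docs").getD 0 : Nat) : Int))) none)
      else PySem.Str.join "/" xs) := by
  by_cases hmem : "docs" ∈ xs
  · have hmr : "docs" ∈ xs.reverse := by simpa using hmem
    have hsome : (PySem.List.index? xs.reverse "docs").isSome := by
      rw [PySem.List.index?_isSome_iff]; exact hmr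
    obtain ⟨k, hk⟩ := Option.isSome_iff_exists.mp hsome
    have hklt : k < xs.length := by
      obtain ⟨hlt, -, -⟩ := PySem.List.getElem_of_index?_eq_some hk
      simpa using hlt
    rw [if_pos (by simpa using hmem), hk]
    simp only [Option.getD_some]
    have hidx : (xs.length : Int) - 1 - (k : Int) = ((xs.length - 1 - k : Nat) : Int) := by
      omega
    rw [hidx, PySem.List.slice_from_natCast]
    congr 1
    rw [pvLoopA_take xs.reverse k hk, List.take_reverse, List.reverse_reverse]
    congr 1
    omega
  · rw [if_neg (by simpa using hmem)]
    rw [pvLoopA_no_docs xs.reverse (by simpa using hmem)]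
    simp

-- ===== VERDICT (by name: the statement is the Claim_ definition above) =====
theorem get_doc_path_py_spec : Claim_equal_get_doc_path_py := by
  intro xs ext _
  unfold Spec_get_doc_path_py get_doc_path_py get_doc_path_py_alt
  simp only [ret_eq]
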